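-- pv_equiv track=rewrite | github.com/spinje/pflow | src/pflow/planning/nodes.py | _score_operation_complexity
-- ===== SOURCE A (Python) =====
-- def _score_operation_complexity(steps: list[str]) -> float:
--     """Score complexity based on operation patterns in steps.
--
--     Args:
--         steps: List of operational requirement steps
--
--     Returns:
--         Operation complexity score (0-25 points)
--     """
--     score = 0
--     complexity_patterns = {
--         # Pattern: (keywords, points)
--         "conditional": (["if", "when", "based on", "depending", "otherwise"], 5),
--         "iteration": (["for each", "iterate", "loop", "batch", "all items"], 5),
--         "aggregation": (["combine", "merge", "aggregate", "collect", "gather"], 4),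
--         "transformation": (["transform", "convert", "parse", "extract", "process"], 3),
--         "analysis": (["analyze", "evaluate", "assess", "determine", "calculate"], 4),
--         "orchestration": (["coordinate", "orchestrate", "sequence", "pipeline"], 4),
--     }
--
--     for _, (keywords, points) in complexity_patterns.items():
--         for step in steps:
--             if any(keyword in step.lower() for keyword in keywords):
--                 score += points
--                 break  # Only count each pattern once
--
--     return min(25, score)
-- ===== SOURCE B (Python) =====
-- def _score_operation_complexity(steps: list[str]) -> float:
--     """Score complexity based on operation patterns in steps (single pass over steps)."""
--     remaining = [
--         (["if", "when", "based on", "depending", "otherwise"], 5),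
--         (["for each", "iterate", "loop", "batch", "all items"], 5),
--         (["combine", "merge", "aggregate", "collect", "gather"], 4),
--         (["transform", "convert", "parse", "extract", "process"], 3),
--         (["analyze", "evaluate", "assess", "determine", "calculate"], 4),
--         (["coordinate", "orchestrate", "sequence", "pipeline"], 4),
--     ]
--     score = 0
--     for step in steps:
--         low = step.lower()
--         still = []
--         for keywords, points in remaining:
--             if any(keyword in low for keyword in keywords):
--                 score += points
--             else:
--                 still.append((keywords, points))
--         remaining = still
--     return min(25, score)
-- ===== Notes on version B (the rewrite author's own statement) =====
-- stated objective: alternative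
-- what changed: One pass over steps with a shrinking worklist of not-yet-credited patterns (lower() computed once per step), instead of a separate scan of the whole step list per pattern with an early break.
import Mathlib
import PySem

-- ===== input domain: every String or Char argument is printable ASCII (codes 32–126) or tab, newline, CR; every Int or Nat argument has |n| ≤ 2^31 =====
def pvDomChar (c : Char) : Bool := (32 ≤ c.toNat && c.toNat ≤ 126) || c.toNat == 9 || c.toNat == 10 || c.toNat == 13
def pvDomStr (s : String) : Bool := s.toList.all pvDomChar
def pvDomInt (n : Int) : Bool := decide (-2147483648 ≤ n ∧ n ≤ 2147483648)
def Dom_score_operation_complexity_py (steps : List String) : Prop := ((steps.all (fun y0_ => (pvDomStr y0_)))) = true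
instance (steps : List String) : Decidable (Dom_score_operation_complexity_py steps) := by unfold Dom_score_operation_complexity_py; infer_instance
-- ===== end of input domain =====

-- B replaces A's per-pattern rescans of the step list by one pass over the steps with a
-- shrinking worklist of not-yet-credited patterns (alternative decomposition, same result).


-- ===== PORT A =====
-- A's pattern dict, in insertion order: name ↦ (keywords, points)
def pvPatternsA : List (String × List String × Int) :=
  [("conditional", (["if", "when", "based on", "depending", "otherwise"], 5)),
   ("iteration", (["for each", "iterate", "loop", "batch", "all items"], 5)),
   ("aggregation", (["combine", "merge", "aggregate", "collect", "gather"], 4)),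
   ("transformation", (["transform", "convert", "parse", "extract", "process"], 3)),
   ("analysis", (["analyze", "evaluate", "assess", "determine", "calculate"], 4)),
   ("orchestration", (["coordinate", "orchestrate", "sequence", "pipeline"], 4))]

-- per pattern: scan steps, credit points at the first matching step (the `break`);
-- List.any is the short-circuit scan-with-break
def score_operation_complexity_py (steps : List String) : Int :=
  min 25
    (pvPatternsA.foldl
      (fun score p =>
        if steps.any (fun step => p.2.1.any (fun keyword => PySem.Str.isIn keyword (PySem.Str.lower step)))
        then score + p.2.2 else score)
      0)

-- ===== PORT B =====
-- B's worklist of not-yet-credited patterns: (keywords, points)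
def pvPatternsB : List (List String × Int) :=
  [(["if", "when", "based on", "depending", "otherwise"], 5),
   (["for each", "iterate", "loop", "batch", "all items"], 5),
   (["combine", "merge", "aggregate", "collect", "gather"], 4),
   (["transform", "convert", "parse", "extract", "process"], 3),
   (["analyze", "evaluate", "assess", "determine", "calculate"], 4),
   (["coordinate", "orchestrate", "sequence", "pipeline"], 4)]

-- one step of B's outer loop: lower the step once, credit matching patterns, keep the rest
def pvStepB (acc : Int × List (List String × Int)) (step : String) : Int × List (List String × Int) :=
  let low := PySem.Str.lower step
  acc.2.foldl
    (fun acc2 p =>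
      if p.1.any (fun keyword => PySem.Str.isIn keyword low)
      then (acc2.1 + p.2, acc2.2)
      else (acc2.1, acc2.2 ++ [p]))
    (acc.1, [])

def score_operation_complexity_py_alt (steps : List String) : Int :=
  min 25 (steps.foldl pvStepB (0, pvPatternsB)).1

-- ===== PRECONDITION & SPEC =====
def Spec_score_operation_complexity_py (steps : List String) (out : Int) : Prop := out = score_operation_complexity_py_alt steps
instance (steps : List String) (out : Int) : Decidable (Spec_score_operation_complexity_py steps out) := by unfold Spec_score_operation_complexity_py; infer_instance

-- ===== CLAIM (what is proved, stated in full; the proofs are below) =====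
def Claim_equal_score_operation_complexity_py : Prop := ∀ (steps : List String), Dom_score_operation_complexity_py steps → Spec_score_operation_complexity_py steps (score_operation_complexity_py steps)

-- ===== LEMMAS AND PROOFS =====

-- does step match pattern p?
def pvM (step : String) (p : List String × Int) : Bool :=
  p.1.any (fun keyword => PySem.Str.isIn keyword (PySem.Str.lower step))

-- A's fold is a sum of the credited points
theorem pvFoldA (c : String × List String × Int → Bool) :
    ∀ (l : List (String × List String × Int)) (a : Int),
      l.foldl (fun score p => if c p then score + p.2.2 else score) a
        = a + (l.map (fun p => if c p then p.2.2 else 0)).sum := by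
  intro l
  induction l with
  | nil => simp
  | cons p ps ih =>
      intro a
      by_cases h : c p = true <;> simp [h, ih] <;> ring

-- B's inner fold credits the matching patterns and keeps the rest, in order
theorem pvInner (step : String) :
    ∀ (l : List (List String × Int)) (a : Int) (done : List (List String × Int)),
      l.foldl
        (fun acc2 p =>
          if pvM step p then (acc2.1 + p.2, acc2.2) else (acc2.1, acc2.2 ++ [p]))
        (a, done)
        = (a + (l.map (fun p => if pvM step p then p.2 else 0)).sum,
           done ++ l.filter (fun p => !pvM step p)) := by
  intro l
  induction l with
  | nil => simp
  | cons p ps ih =>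
      intro a done
      by_cases h : pvM step p = true <;> simp [h, ih] <;> ring

-- splitting a credited sum at one step
theorem pvSplit (step : String) (c : List String × Int → Bool) :
    ∀ (l : List (List String × Int)),
      (l.map (fun p => if pvM step p || c p then p.2 else 0)).sum
        = (l.map (fun p => if pvM step p then p.2 else 0)).sum
          + ((l.filter (fun p => !pvM step p)).map (fun p => if c p then p.2 else 0)).sum := by
  intro l
  induction l with
  | nil => simp
  | cons p ps ih =>
      simp only [Bool.or_eq_true] at ih
      by_cases h : pvM step p = true <;> by_cases h2 : c p = true <;>
        simp [h, h2, ih] <;> ring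

-- B's outer fold credits each still-remaining pattern matched by some step
theorem pvMain :
    ∀ (steps : List String) (a : Int) (l : List (List String × Int)),
      (steps.foldl pvStepB (a, l)).1
        = a + (l.map (fun p => if steps.any (fun step => pvM step p) then p.2 else 0)).sum := by
  intro steps
  induction steps with
  | nil => intro a l; simp
  | cons step rest ih =>
      intro a l
      have hstep : pvStepB (a, l) step
          = (a + (l.map (fun p => if pvM step p then p.2 else 0)).sum,
             l.filter (fun p => !pvM step p)) := by
        simpa [pvStepB, pvM] using pvInner step l a []
      calc (List.foldl pvStepB (a, l) (step :: rest)).1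
          = (List.foldl pvStepB (pvStepB (a, l) step) rest).1 := by simp
        _ = a + (l.map (fun p => if pvM step p then p.2 else 0)).sum
              + (((l.filter (fun p => !pvM step p)).map
                  (fun p => if rest.any (fun s => pvM s p) then p.2 else 0)).sum) := by
              rw [hstep, ih, add_assoc]
        _ = a + (l.map (fun p => if (step :: rest).any (fun s => pvM s p) then p.2 else 0)).sum := by
              rw [show (l.map (fun p => if (step :: rest).any (fun s => pvM s p) then p.2 else 0)).sum
                    = (l.map (fun p => if pvM step p || rest.any (fun s => pvM s p) then p.2 else 0)).sum by simp,
                  pvSplit step (fun p => rest.any (fun s => pvM s p)) l, add_assoc]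

-- ===== VERDICT (by name: the statement is the Claim_ definition above) =====
theorem score_operation_complexity_py_spec : Claim_equal_score_operation_complexity_py := by
  intro steps _
  unfold Spec_score_operation_complexity_py score_operation_complexity_py score_operation_complexity_py_alt
  rw [pvMain steps 0 pvPatternsB,
      pvFoldA (fun p => steps.any (fun step => p.2.1.any (fun keyword => PySem.Str.isIn keyword (PySem.Str.lower step)))) pvPatternsA 0]
  simp [pvPatternsA, pvPatternsB, pvM]
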